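-- pv_equiv track=rewrite | github.com/legandrop/LGA_Nuke | LGA_ToolPack-B/shortcuteditor.py | _overrides_as_code
-- ===== SOURCE A (Python) =====
-- def _overrides_as_code(overrides):
--     menus = {}
--     for item, key in overrides.items():
--         menu_name, _, path = item.partition("/")
--
--         menus.setdefault(menu_name, []).append((path, key))
--
--     lines = []
--     for menu, things in menus.items():
--         lines.append("cur_menu = nuke.menu(%r)" % menu)
--         for path, key in things:
--             lines.append("m = cur_menu.findItem(%r)" % path)
--             lines.append("if m is not None:")
--             lines.append("    m.setShortcut(%r)" % key)
--             lines.append("")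
--     return "\n".join(lines)
-- ===== SOURCE B (Python) =====
-- def _overrides_as_code(overrides):
--     entries = [(item.partition("/")[0], item.partition("/")[2], key)
--                for item, key in overrides.items()]
--     menus = list(dict.fromkeys(m for m, _, _ in entries))
--     lines = []
--     for menu in menus:
--         lines.append("cur_menu = nuke.menu(%r)" % menu)
--         for m, path, key in entries:
--             if m == menu:
--                 lines.extend(["m = cur_menu.findItem(%r)" % path,
--                               "if m is not None:",
--                               "    m.setShortcut(%r)" % key,
--                               ""])
--     return "\n".join(lines)
-- ===== Notes on version B (the rewrite author's own statement) =====
-- stated objective: alternative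
-- what changed: B replaces A's one-pass grouping dict (menu -> list of (path,key)) by an ordered distinct-menu list (dict.fromkeys) plus one filtering re-scan of the precomputed entries per menu, emitting the same lines in the same order.
import Mathlib
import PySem

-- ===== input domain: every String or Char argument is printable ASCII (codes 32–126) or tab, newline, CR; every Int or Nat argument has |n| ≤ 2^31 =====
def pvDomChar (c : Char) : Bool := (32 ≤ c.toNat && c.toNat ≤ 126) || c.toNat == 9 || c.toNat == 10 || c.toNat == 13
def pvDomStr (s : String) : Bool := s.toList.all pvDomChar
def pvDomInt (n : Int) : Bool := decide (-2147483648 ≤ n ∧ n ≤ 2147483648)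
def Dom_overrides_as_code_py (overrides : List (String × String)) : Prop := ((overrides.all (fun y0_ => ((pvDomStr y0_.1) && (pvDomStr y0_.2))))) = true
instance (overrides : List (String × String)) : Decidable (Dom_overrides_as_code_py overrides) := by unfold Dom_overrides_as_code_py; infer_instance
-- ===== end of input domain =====

-- B trades A's grouping dict for an ordered distinct-menu list plus a filtering re-scan per menu (alternative structure, same output).



-- ===== PORT A =====
-- Shared string primitives (both Pythons use them verbatim):
-- pvPartitionSlash cs = (before, after) of cs.partition("/") (the middle is "/" iff '/' ∈ cs);
-- pvReprChars cs = repr(s) for s over the task's domain (printable ASCII + tab/newline/CR):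
-- quote choice and the escapes \\ \t \n \r and the quote itself — exact there, ported by hand (no PySem repr).
def pvPartitionSlash (cs : List Char) : List Char × List Char :=
  match cs with
  | [] => ([], [])
  | c :: rest =>
    if c = '/' then ([], rest)
    else
      let p := pvPartitionSlash rest
      (c :: p.1, p.2)

def pvReprChars (cs : List Char) : List Char :=
  let q : Char := if '\'' ∈ cs ∧ '"' ∉ cs then '"' else '\''
  (q :: cs.flatMap (fun c =>
    if c = '\\' then ['\\', '\\']
    else if c = q then ['\\', q]
    else if c = '\t' then ['\\', 't']
    else if c = '\n' then ['\\', 'n']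
    else if c = '\r' then ['\\', 'r']
    else [c])) ++ [q]

-- the four appended lines, rendered at char level ("%r" = pvReprChars)
def pvHdr (menu : List Char) : List Char := "cur_menu = nuke.menu(".toList ++ pvReprChars menu ++ [')']
def pvBody (path key : List Char) : List (List Char) :=
  ["m = cur_menu.findItem(".toList ++ pvReprChars path ++ [')'],
   "if m is not None:".toList,
   "    m.setShortcut(".toList ++ pvReprChars key ++ [')'],
   []]

-- A: group into an insertion-ordered dict menu ↦ [(path, key)], then emit per dict item.
-- (setdefault(k, []).append(x) is Dict.modify k [] (· ++ [x]).)
def overrides_as_code_py (overrides : List (String × String)) : String :=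
  let menus : PySem.Dict (List Char) (List (List Char × List Char)) :=
    overrides.foldl
      (fun d p =>
        d.modify (pvPartitionSlash p.1.toList).1 []
          (· ++ [((pvPartitionSlash p.1.toList).2, p.2.toList)]))
      PySem.Dict.empty
  let lines : List (List Char) :=
    menus.items.foldl
      (fun lines mt =>
        mt.2.foldl (fun ls pk => ls ++ pvBody pk.1 pk.2) (lines ++ [pvHdr mt.1]))
      []
  String.ofList (PySem.Chars.join ['\n'] lines)

-- ===== PORT B =====
-- B: precompute (menu, path, key) entries, take the ordered distinct menu list
-- (dict.fromkeys = PySem.List.dedup), and for each menu re-scan the entries, filtering.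
def overrides_as_code_py_alt (overrides : List (String × String)) : String :=
  let entries : List (List Char × List Char × List Char) :=
    overrides.map (fun p =>
      ((pvPartitionSlash p.1.toList).1, (pvPartitionSlash p.1.toList).2, p.2.toList))
  let menus : List (List Char) := PySem.List.dedup (entries.map (fun e => e.1))
  let lines : List (List Char) :=
    menus.foldl
      (fun ls menu =>
        entries.foldl
          (fun ls e => if e.1 == menu then ls ++ pvBody e.2.1 e.2.2 else ls)
          (ls ++ [pvHdr menu]))
      []
  String.ofList (PySem.Chars.join ['\n'] lines)

-- ===== PRECONDITION & SPEC =====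
def Spec_overrides_as_code_py (overrides : List (String × String)) (out : String) : Prop := out = overrides_as_code_py_alt overrides
instance (overrides : List (String × String)) (out : String) : Decidable (Spec_overrides_as_code_py overrides out) := by unfold Spec_overrides_as_code_py; infer_instance

-- ===== CLAIM (what is proved, stated in full; the proofs are below) =====
def Claim_equal_overrides_as_code_py : Prop := ∀ (overrides : List (String × String)), Dom_overrides_as_code_py overrides → Spec_overrides_as_code_py overrides (overrides_as_code_py overrides)

-- ===== LEMMAS AND PROOFS =====

-- proof-only abbreviations: the flattened entry list and the common closed form of the emitted lines
def pvCommon (overrides : List (String × String)) : List (List Char) :=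
  (PySem.List.dedup ((overrides.map (fun p => ((pvPartitionSlash p.1.toList).1, (pvPartitionSlash p.1.toList).2, p.2.toList))).map (·.1))).foldl
    (fun ls k => ls ++ [pvHdr k] ++
      ((overrides.map (fun p => ((pvPartitionSlash p.1.toList).1, (pvPartitionSlash p.1.toList).2, p.2.toList))).filter (fun e => e.1 == k)).flatMap (fun e => pvBody e.2.1 e.2.2))
    []

lemma pvA_eq (overrides : List (String × String)) :
    overrides_as_code_py overrides
      = String.ofList (PySem.Chars.join ['\n'] (pvCommon overrides)) := by
  unfold overrides_as_code_py pvCommon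
  dsimp only
  set L := overrides.map (fun p => ((pvPartitionSlash p.1.toList).1, (pvPartitionSlash p.1.toList).2, p.2.toList)) with hL
  have hfold :
      overrides.foldl
        (fun (d : PySem.Dict (List Char) (List (List Char × List Char))) p =>
          d.modify (pvPartitionSlash p.1.toList).1 []
            (· ++ [((pvPartitionSlash p.1.toList).2, p.2.toList)]))
        PySem.Dict.empty
      = L.foldl (fun d q => d.modify q.1 [] (· ++ [q.2])) PySem.Dict.empty := by
    rw [hL, List.foldl_map]
  rw [hfold]
  set d := L.foldl (fun d q => d.modify q.1 [] (· ++ [q.2])) PySem.Dict.empty with hd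
  have hkeys : d.keys = PySem.List.dedup (L.map (·.1)) := by
    rw [hd, PySem.Dict.keys_foldl_modify_key L (·.1) [] _ PySem.Dict.empty]
    simp [PySem.Dict.empty, PySem.Set.update_nil_left]
  have hnodup : d.keys.Nodup := by
    rw [hkeys]; exact PySem.List.nodup_dedup _
  have hgetD : ∀ k, d.getD k [] = (L.filter (fun q => q.1 == k)).map (·.2) := by
    intro k
    rw [hd, PySem.Dict.getD_foldl_modify_append]
    simp
  rw [PySem.Dict.items_eq_map_keys d hnodup [], List.foldl_map, hkeys]
  congr 2
  apply PySem.List.foldl_congr_mem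
  intro ls k _
  rw [hgetD k, PySem.List.foldl_append_eq_flatMap]
  simp [List.flatMap_map, List.append_assoc]

lemma pvB_eq (overrides : List (String × String)) :
    overrides_as_code_py_alt overrides
      = String.ofList (PySem.Chars.join ['\n'] (pvCommon overrides)) := by
  unfold overrides_as_code_py_alt pvCommon
  dsimp only
  congr 2
  apply PySem.List.foldl_congr_mem
  intro ls k _
  rw [PySem.List.foldl_if_eq_foldl_filter, PySem.List.foldl_append_eq_flatMap]

-- ===== VERDICT (by name: the statement is the Claim_ definition above) =====
theorem overrides_as_code_py_spec : Claim_equal_overrides_as_code_py := by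
  intro overrides _
  unfold Spec_overrides_as_code_py
  rw [pvA_eq, pvB_eq]
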